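-- pv_equiv track=rewrite | github.com/jhajagos/SemanticUMLSTagger | text_aligner.py | annotate_string_with_alignments
-- ===== SOURCE A (Python) =====
-- def annotate_string_with_alignments(original_string, alignments_with_annotations):
--     """
--         Alignments with annotations must follow the following form [((5,10),('<<','>>'', ((11,30),('<<<','>>>>>'))]
--         also the alignments must not overlap.
--     """
--
--     sorted_alignments_with_annotations = sorted(alignments_with_annotations, key=lambda x: x[0][0])
--     annotated_string = original_string
--     position_offset = 0
--     for alignment in sorted_alignments_with_annotations:
--         start_position, end_position = alignment[0]
--         start_annotation, end_annotation = alignment[1]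
--         len_start_annotation = len(start_annotation)
--         len_end_annotation = len(end_annotation)
--         annotated_string = annotated_string[0:(start_position + position_offset)] + start_annotation \
--                            + annotated_string[(start_position + position_offset):(end_position + position_offset)] \
--                            + end_annotation + annotated_string[(end_position + position_offset):]
--
--         position_offset += (len_start_annotation + len_end_annotation)
--
--     return annotated_string
-- ===== SOURCE B (Python) =====
-- def _slice_bound(x, n):
--     """Resolve a Python slice bound against a sequence of length n."""
--     if x < 0:
--         x += n
--     if x < 0:
--         return 0
--     return min(x, n)
--
--
-- def _slice_pieces(pieces, a, b):
--     """The sub-pieces covering [a:b] of the text represented by the piece table (no copying)."""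
--     out = []
--     for p, lo, hi in pieces:
--         n = hi - lo
--         cut = min(b, n)
--         if a < cut:
--             out.append((p, lo + a, lo + cut))
--         a = max(a - n, 0)
--         b = max(b - n, 0)
--     return out
--
--
-- def annotate_string_with_alignments(original_string, alignments_with_annotations):
--     """Piece table: each insertion only splits index triples; characters are copied once, at the final join."""
--     pieces = [(original_string, 0, len(original_string))]
--     position_offset = 0
--     for (start_position, end_position), (start_annotation, end_annotation) in \
--             sorted(alignments_with_annotations, key=lambda x: x[0][0]):
--         total = sum(hi - lo for _, lo, hi in pieces)
--         i = _slice_bound(start_position + position_offset, total)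
--         j = _slice_bound(end_position + position_offset, total)
--         pieces = (_slice_pieces(pieces, 0, i)
--                   + [(start_annotation, 0, len(start_annotation))]
--                   + _slice_pieces(pieces, i, j)
--                   + [(end_annotation, 0, len(end_annotation))]
--                   + _slice_pieces(pieces, j, total))
--         position_offset += len(start_annotation) + len(end_annotation)
--     return "".join(p[lo:hi] for p, lo, hi in pieces)
-- ===== Notes on version B (the rewrite author's own statement) =====
-- stated objective: alternative
-- what changed: B represents the text as a piece table of (string, lo, hi) index triples: each insertion splits triples by index arithmetic instead of re-slicing and re-concatenating the whole growing string, and characters are copied once by a single join at the end; it trades A's C-level string copying for Python-level piece bookkeeping and reproduces A exactly, including Python's slice clamping on out-of-range, negative and overlapping positions.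
import Mathlib
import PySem

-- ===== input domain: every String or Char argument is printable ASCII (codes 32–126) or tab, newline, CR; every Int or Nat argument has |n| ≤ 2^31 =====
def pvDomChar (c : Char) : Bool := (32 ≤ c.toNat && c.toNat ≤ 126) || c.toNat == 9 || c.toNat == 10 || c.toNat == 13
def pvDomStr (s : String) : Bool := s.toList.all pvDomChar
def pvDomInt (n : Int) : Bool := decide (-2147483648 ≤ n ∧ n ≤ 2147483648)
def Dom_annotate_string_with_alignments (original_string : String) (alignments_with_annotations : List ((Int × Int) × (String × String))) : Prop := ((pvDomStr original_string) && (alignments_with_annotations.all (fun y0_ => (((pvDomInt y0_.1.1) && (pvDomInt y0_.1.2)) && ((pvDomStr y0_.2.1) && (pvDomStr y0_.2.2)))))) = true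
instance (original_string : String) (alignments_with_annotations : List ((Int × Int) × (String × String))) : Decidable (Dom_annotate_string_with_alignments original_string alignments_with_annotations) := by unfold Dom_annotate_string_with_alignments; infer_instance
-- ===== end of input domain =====

-- ===== PORT A =====
-- A re-slices and re-concatenates the whole growing string per alignment; B keeps a piece table of
-- (string, lo, hi) index triples, splits triples per insertion and joins the characters once at the end.
def pvAStep (st : List Char × Int) (al : (Int × Int) × (String × String)) : List Char × Int :=
  (PySem.List.slice st.1 (some 0) (some (al.1.1 + st.2)) ++ al.2.1.toList ++
     PySem.List.slice st.1 (some (al.1.1 + st.2)) (some (al.1.2 + st.2)) ++ al.2.2.toList ++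
     PySem.List.slice st.1 (some (al.1.2 + st.2)) none,
   st.2 + (al.2.1.toList.length : Int) + (al.2.2.toList.length : Int))

def annotate_string_with_alignments (original_string : String) (alignments_with_annotations : List ((Int × Int) × (String × String))) : String :=
  let srt := PySem.List.sorted alignments_with_annotations (fun x => x.1.1) false
  String.ofList (srt.foldl pvAStep (original_string.toList, 0)).1

-- ===== PORT B =====
-- _slice_bound(x, n): resolve a Python slice bound against length n
def pvSliceBound (x : Int) (n : Nat) : Nat :=
  let x1 := if x < 0 then x + n else x
  if x1 < 0 then 0 else min x1.toNat n

-- _slice_pieces(pieces, a, b): the sub-pieces covering [a:b] of the represented text (no copying)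
def pvSlicePieces : List (List Char × Nat × Nat) → Nat → Nat → List (List Char × Nat × Nat)
  | [], _, _ => []
  | (p, lo, hi) :: rest, a, b =>
      (if a < min b (hi - lo) then [(p, lo + a, lo + min b (hi - lo))] else []) ++
        pvSlicePieces rest (a - (hi - lo)) (b - (hi - lo))

-- p[lo:hi] for one piece (used by the final join)
def pvFrag (x : List Char × Nat × Nat) : List Char := (x.1.drop x.2.1).take (x.2.2 - x.2.1)

def pvPStep (st : List (List Char × Nat × Nat) × Int) (al : (Int × Int) × (String × String)) : List (List Char × Nat × Nat) × Int :=
  let total := (st.1.map (fun x => x.2.2 - x.2.1)).sum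
  let i := pvSliceBound (al.1.1 + st.2) total
  let j := pvSliceBound (al.1.2 + st.2) total
  (pvSlicePieces st.1 0 i ++ [(al.2.1.toList, 0, al.2.1.toList.length)] ++
     pvSlicePieces st.1 i j ++ [(al.2.2.toList, 0, al.2.2.toList.length)] ++
     pvSlicePieces st.1 j total,
   st.2 + (al.2.1.toList.length : Int) + (al.2.2.toList.length : Int))

def annotate_string_with_alignments_alt (original_string : String) (alignments_with_annotations : List ((Int × Int) × (String × String))) : String :=
  let srt := PySem.List.sorted alignments_with_annotations (fun x => x.1.1) false
  let st := srt.foldl pvPStep ([(original_string.toList, 0, original_string.toList.length)], 0)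
  String.ofList (st.1.map pvFrag).flatten

-- ===== PRECONDITION & SPEC =====
def Spec_annotate_string_with_alignments (original_string : String) (alignments_with_annotations : List ((Int × Int) × (String × String))) (out : String) : Prop := out = annotate_string_with_alignments_alt original_string alignments_with_annotations
instance (original_string : String) (alignments_with_annotations : List ((Int × Int) × (String × String))) (out : String) : Decidable (Spec_annotate_string_with_alignments original_string alignments_with_annotations out) := by unfold Spec_annotate_string_with_alignments; infer_instance

-- ===== CLAIM (what is proved, stated in full; the proofs are below) =====
def Claim_equal_annotate_string_with_alignments : Prop := ∀ (original_string : String) (alignments_with_annotations : List ((Int × Int) × (String × String))), Dom_annotate_string_with_alignments original_string alignments_with_annotations → Spec_annotate_string_with_alignments original_string alignments_with_annotations (annotate_string_with_alignments original_string alignments_with_annotations)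

-- ===== LEMMAS AND PROOFS =====

-- the piece table is well-formed: every triple's upper bound lies inside its string
def pvWF (ps : List (List Char × Nat × Nat)) : Prop := ∀ x ∈ ps, x.2.2 ≤ x.1.length

lemma pvSliceBound_eq_clampIdx (x : Int) (n : Nat) :
    pvSliceBound x n = PySem.List.clampIdx n x := by
  simp only [pvSliceBound, PySem.List.clampIdx]
  split_ifs <;> omega

lemma pvWF_slicePieces : ∀ (ps : List (List Char × Nat × Nat)) (a b : Nat),
    pvWF ps → pvWF (pvSlicePieces ps a b) := by
  intro ps
  induction ps with
  | nil => intro a b _; exact fun x hx => absurd hx (by simp [pvSlicePieces])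
  | cons piece rest ih =>
      intro a b hwf
      obtain ⟨p, lo, hi⟩ := piece
      intro x hx
      simp only [pvSlicePieces, List.mem_append] at hx
      rcases hx with hx | hx
      · rcases Nat.lt_or_ge a (min b (hi - lo)) with h | h
        · have hhd : x = (p, lo + a, lo + min b (hi - lo)) := by simpa [h] using hx
          have hp : hi ≤ p.length := hwf (p, lo, hi) (List.mem_cons_self ..)
          subst hhd
          simp only
          omega
        · simp [Nat.not_lt.mpr h] at hx
      · exact ih (a - (hi - lo)) (b - (hi - lo))
          (fun y hy => hwf y (List.mem_cons_of_mem _ hy)) x hx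

lemma pvFlatten_slicePieces : ∀ (ps : List (List Char × Nat × Nat)) (a b : Nat),
    pvWF ps →
    ((pvSlicePieces ps a b).map pvFrag).flatten
      = (((ps.map pvFrag).flatten).take b).drop a := by
  intro ps
  induction ps with
  | nil => intro a b _; simp [pvSlicePieces]
  | cons piece rest ih =>
      intro a b hwf
      obtain ⟨p, lo, hi⟩ := piece
      have hp : hi ≤ p.length := hwf (p, lo, hi) (List.mem_cons_self ..)
      have hq : (pvFrag (p, lo, hi)).length = hi - lo := by
        simp [pvFrag]
        omega
      have hhead : ((if a < min b (hi - lo)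
              then [(p, lo + a, lo + min b (hi - lo))] else []).map pvFrag).flatten
          = (((pvFrag (p, lo, hi)).take b).drop a) := by
        have hdt : ((pvFrag (p, lo, hi)).take b).drop a
            = (p.drop (lo + a)).take (min b (hi - lo) - a) := by
          rw [List.drop_take]
          unfold pvFrag
          simp only
          rw [List.drop_take, List.drop_drop, List.take_take]
          have h1 : lo + a = a + lo := by omega
          have h2 : min (b - a) (hi - lo - a) = min b (hi - lo) - a := by omega
          rw [h1, h2]
        rcases Nat.lt_or_ge a (min b (hi - lo)) with h | h
        · rw [hdt]
          simp only [if_pos h, List.map_cons, List.map_nil, List.flatten_cons,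
            List.flatten_nil, List.append_nil]
          unfold pvFrag
          simp only
          congr 1
          omega
        · rw [hdt]
          simp [Nat.not_lt.mpr h, Nat.sub_eq_zero_of_le h]
      simp only [pvSlicePieces, List.map_append, List.flatten_append, List.map_cons,
        List.flatten_cons, List.take_append, List.drop_append, hhead, hq,
        List.length_take]
      congr 1
      rw [ih (a - (hi - lo)) (b - (hi - lo))
          (fun y hy => hwf y (List.mem_cons_of_mem _ hy))]
      rcases Nat.le_total (hi - lo) b with h | h
      · rw [min_eq_right h]
      · have hb : b - (hi - lo) = 0 := by omega
        rw [hb]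
        simp

lemma pvTotal_eq_length (ps : List (List Char × Nat × Nat)) (hwf : pvWF ps) :
    (ps.map (fun x => x.2.2 - x.2.1)).sum = ((ps.map pvFrag).flatten).length := by
  induction ps with
  | nil => simp
  | cons piece rest ih =>
      obtain ⟨p, lo, hi⟩ := piece
      have hp : hi ≤ p.length := hwf (p, lo, hi) (List.mem_cons_self ..)
      have ihr := ih (fun y hy => hwf y (List.mem_cons_of_mem _ hy))
      simp only [List.map_cons, List.sum_cons, List.flatten_cons, List.length_append, ihr]
      simp [pvFrag]
      omega

lemma pvClampIdx_zero (n : Nat) : PySem.List.clampIdx n 0 = 0 := by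
  unfold PySem.List.clampIdx
  simp

lemma pvStep_eq (ps : List (List Char × Nat × Nat)) (off : Int)
    (al : (Int × Int) × (String × String)) (hwf : pvWF ps) :
    pvAStep (((ps.map pvFrag).flatten), off) al
      = ((((pvPStep (ps, off) al).1.map pvFrag).flatten), (pvPStep (ps, off) al).2) ∧
    pvWF (pvPStep (ps, off) al).1 := by
  have htot : (ps.map (fun x => x.2.2 - x.2.1)).sum = ((ps.map pvFrag).flatten).length :=
    pvTotal_eq_length ps hwf
  constructor
  · unfold pvAStep pvPStep
    simp only [htot, pvSliceBound_eq_clampIdx, List.map_append, List.flatten_append,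
      List.map_cons, List.map_nil, List.flatten_cons, List.flatten_nil, List.append_nil,
      pvFlatten_slicePieces _ _ _ hwf, Prod.mk.injEq]
    refine ⟨?_, trivial⟩
    set X := (ps.map pvFrag).flatten with hX
    have hfragl : pvFrag (al.2.1.toList, 0, al.2.1.toList.length) = al.2.1.toList := by
      simp [pvFrag]
    have hfragr : pvFrag (al.2.2.toList, 0, al.2.2.toList.length) = al.2.2.toList := by
      simp [pvFrag]
    have h1 : PySem.List.slice X (some 0) (some (al.1.1 + off))
        = (X.take (PySem.List.clampIdx X.length (al.1.1 + off))).drop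
            (PySem.List.clampIdx X.length 0) := by
      unfold PySem.List.slice
      rw [List.drop_take]
    have h2 : PySem.List.slice X (some (al.1.1 + off)) (some (al.1.2 + off))
        = (X.take (PySem.List.clampIdx X.length (al.1.2 + off))).drop
            (PySem.List.clampIdx X.length (al.1.1 + off)) := by
      unfold PySem.List.slice
      rw [List.drop_take]
    have h3 : PySem.List.slice X (some (al.1.2 + off)) none
        = (X.take X.length).drop (PySem.List.clampIdx X.length (al.1.2 + off)) := by
      rw [PySem.List.slice_some_none, List.take_length]
    rw [h1, h2, h3, hfragl, hfragr, pvClampIdx_zero, List.drop_zero]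
  · intro x hx
    unfold pvPStep at hx
    simp only [List.mem_append, List.mem_singleton] at hx
    rcases hx with ((((hx | hx) | hx) | hx) | hx)
    · exact pvWF_slicePieces ps _ _ hwf x hx
    · subst hx; simp
    · exact pvWF_slicePieces ps _ _ hwf x hx
    · subst hx; simp
    · exact pvWF_slicePieces ps _ _ hwf x hx

lemma pvFold_eq : ∀ (L : List ((Int × Int) × (String × String)))
    (ps : List (List Char × Nat × Nat)) (off : Int), pvWF ps →
    L.foldl pvAStep (((ps.map pvFrag).flatten), off)
      = ((((L.foldl pvPStep (ps, off)).1.map pvFrag).flatten), (L.foldl pvPStep (ps, off)).2) := by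
  intro L
  induction L with
  | nil => intro ps off _; rfl
  | cons a t ih =>
      intro ps off hwf
      obtain ⟨hstep, hwf'⟩ := pvStep_eq ps off a hwf
      simp only [List.foldl_cons, hstep]
      have hsnd : pvPStep (ps, off) a
          = ((pvPStep (ps, off) a).1, (pvPStep (ps, off) a).2) := rfl
      rw [hsnd]
      exact ih (pvPStep (ps, off) a).1 (pvPStep (ps, off) a).2 hwf'

-- ===== VERDICT (by name: the statement is the Claim_ definition above) =====
theorem annotate_string_with_alignments_spec : Claim_equal_annotate_string_with_alignments := by
  intro orig als _
  unfold Spec_annotate_string_with_alignments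
  unfold annotate_string_with_alignments annotate_string_with_alignments_alt
  dsimp only
  have hinit : orig.toList
      = (([(orig.toList, 0, orig.toList.length)].map pvFrag).flatten) := by
    simp [pvFrag]
  have hwf0 : pvWF [(orig.toList, 0, orig.toList.length)] := by
    intro x hx
    simp at hx
    subst hx
    simp
  conv_lhs => rw [hinit]
  rw [pvFold_eq (PySem.List.sorted als (fun x => x.1.1) false)
      [(orig.toList, 0, orig.toList.length)] 0 hwf0]
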